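-- pv_equiv track=rewrite | github.com/CourierLFF/VideoIdeaGenerator | data_analyzer.py | count_duplicate_links
-- ===== SOURCE A (Python) =====
-- def count_duplicate_links(links):
--     duplicate_dict = {}
--     for link in links:
--         if link in duplicate_dict:
--             duplicate_dict[link] += 1
--         else:
--             duplicate_dict[link] = 1
--     return sorted(duplicate_dict.items(), key=lambda x: x[1], reverse=True)
-- ===== SOURCE B (Python) =====
-- def count_duplicate_links(links):
--     duplicate_dict = {}
--     for link in links:
--         if link in duplicate_dict:
--             duplicate_dict[link] += 1
--         else:
--             duplicate_dict[link] = 1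
--     max_count = max(duplicate_dict.values(), default=0)
--     buckets = [[] for _ in range(max_count + 1)]
--     for item in duplicate_dict.items():
--         buckets[item[1]].append(item)
--     result = []
--     for c in range(max_count, 0, -1):
--         result.extend(buckets[c])
--     return result
-- ===== Notes on version B (the rewrite author's own statement) =====
-- stated objective: alternative
-- what changed: Replaces the comparison sort (sorted by count, reverse=True) with a counting/bucket sort: items are appended to buckets indexed by their count in dict order, then buckets are concatenated from max_count down to 1, which reproduces the stable descending order.
import Mathlib
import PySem

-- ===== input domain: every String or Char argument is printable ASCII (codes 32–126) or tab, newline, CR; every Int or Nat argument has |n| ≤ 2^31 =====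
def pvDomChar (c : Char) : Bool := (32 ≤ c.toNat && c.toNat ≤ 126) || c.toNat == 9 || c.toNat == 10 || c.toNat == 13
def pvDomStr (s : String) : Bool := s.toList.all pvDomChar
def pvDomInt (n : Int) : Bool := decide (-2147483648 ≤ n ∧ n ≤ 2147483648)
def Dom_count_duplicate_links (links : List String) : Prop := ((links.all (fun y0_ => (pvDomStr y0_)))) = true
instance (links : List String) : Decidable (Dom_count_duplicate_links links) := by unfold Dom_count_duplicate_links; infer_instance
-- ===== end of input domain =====

-- B replaces the comparison sort by a stable counting/bucket sort over the occurrence counts (objective: alternative algorithm).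

-- ===== PORT A =====
def count_duplicate_links (links : List String) : List (String × Int) :=
  let duplicate_dict : PySem.Dict String Int :=
    links.foldl (fun d link =>
      if (PySem.Dict.get? d link).isSome then
        PySem.Dict.modify d link 0 (· + 1)
      else
        PySem.Dict.insert d link 1) ⟨[]⟩
  PySem.List.sorted (PySem.Dict.items duplicate_dict) (fun x => x.2) true

-- ===== PORT B =====
def count_duplicate_links_alt (links : List String) : List (String × Int) :=
  let duplicate_dict : PySem.Dict String Int :=
    links.foldl (fun d link =>
      if (PySem.Dict.get? d link).isSome then
        PySem.Dict.modify d link 0 (· + 1)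
      else
        PySem.Dict.insert d link 1) ⟨[]⟩
  let max_count : Int := PySem.List.maxD (PySem.Dict.values duplicate_dict) (fun v => v) 0
  let buckets : List (List (String × Int)) := List.replicate (max_count + 1).toNat []
  let buckets :=
    (PySem.Dict.items duplicate_dict).foldl
      (fun bs item => PySem.List.pySetD bs item.2 (PySem.List.pyGetD bs item.2 [] ++ [item])) buckets
  (PySem.List.pyRange max_count 0 (-1)).foldl
    (fun result c => result ++ PySem.List.pyGetD buckets c []) []

-- ===== PRECONDITION & SPEC =====
def Spec_count_duplicate_links (links : List String) (out : List (String × Int)) : Prop := out = count_duplicate_links_alt links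
instance (links : List String) (out : List (String × Int)) : Decidable (Spec_count_duplicate_links links out) := by unfold Spec_count_duplicate_links; infer_instance

-- ===== CLAIM (what is proved, stated in full; the proofs are below) =====
def Claim_equal_count_duplicate_links : Prop := ∀ (links : List String), Dom_count_duplicate_links links → Spec_count_duplicate_links links (count_duplicate_links links)

-- ===== LEMMAS AND PROOFS =====

-- the counter dict both programs build
def pvBuild (links : List String) : PySem.Dict String Int :=
  links.foldl (fun d link =>
    if (PySem.Dict.get? d link).isSome then
      PySem.Dict.modify d link 0 (· + 1)
    else
      PySem.Dict.insert d link 1) ⟨[]⟩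

-- [m, m-1, …, 1] as Ints
def descInts : Nat → List Int
  | 0 => []
  | m + 1 => ((m + 1 : Nat) : Int) :: descInts m

-- buckets, concatenated from count m down to 1
def bform (m : Nat) (xs : List (String × Int)) : List (String × Int) :=
  (descInts m).flatMap (fun c => xs.filter (fun x => x.2 == c))

lemma mem_descInts {m : Nat} {c : Int} (h : c ∈ descInts m) :
    ∃ k : Nat, c = (k : Int) ∧ 1 ≤ k ∧ k ≤ m := by
  induction m with
  | zero => simp [descInts] at h
  | succ m ih =>
    simp only [descInts, List.mem_cons] at h
    rcases h with h | h
    · exact ⟨m + 1, h, by omega, le_refl _⟩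
    · obtain ⟨k, hk, h1, h2⟩ := ih h
      exact ⟨k, hk, h1, by omega⟩

lemma mem_bform {m : Nat} {xs : List (String × Int)} {b : String × Int}
    (h : b ∈ bform m xs) : b ∈ xs ∧ 1 ≤ b.2 ∧ b.2 ≤ (m : Int) := by
  simp only [bform, List.mem_flatMap, List.mem_filter, beq_iff_eq] at h
  obtain ⟨c, hc, hb, hbc⟩ := h
  obtain ⟨k, rfl, h1, h2⟩ := mem_descInts hc
  refine ⟨hb, ?_, ?_⟩ <;> omega

lemma insertBy_append_of_forall_not {α : Type} (before : α → α → Bool) (x : α)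
    (L1 L2 : List α) (h : ∀ b ∈ L1, before x b = false) :
    PySem.List.insertBy before x (L1 ++ L2) = L1 ++ PySem.List.insertBy before x L2 := by
  induction L1 with
  | nil => simp
  | cons y ys ih =>
    have hy := h y (by simp)
    simp only [List.cons_append, PySem.List.insertBy, hy, Bool.false_eq_true, if_false]
    rw [ih (fun b hb => h b (by simp [hb]))]

lemma bform_nil (m : Nat) : bform m [] = [] := by
  simp [bform]

lemma bform_cons_succ (m : Nat) (xs : List (String × Int)) :
    bform (m + 1) xs
      = xs.filter (fun x => x.2 == ((m + 1 : Nat) : Int)) ++ bform m xs := by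
  simp [bform, descInts]

lemma bform_append_high {m : Nat} {x : String × Int} (h : (m : Int) < x.2)
    (xs : List (String × Int)) : bform m (xs ++ [x]) = bform m xs := by
  unfold bform
  apply List.flatMap_congr
  intro c hc
  obtain ⟨k, rfl, h1, h2⟩ := mem_descInts hc
  rw [List.filter_append]
  have hx : (x.2 == (k : Int)) = false := by
    simp only [beq_eq_false_iff_ne, ne_eq]
    intro he; rw [he] at h; exact absurd h (by omega)
  simp [hx]

lemma insert_bform {m : Nat} {x : String × Int} (h1 : 1 ≤ x.2) (h2 : x.2 ≤ (m : Int))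
    (xs : List (String × Int)) :
    PySem.List.insertBy (fun a b => decide (b.2 < a.2)) x (bform m xs) = bform m (xs ++ [x]) := by
  induction m generalizing xs with
  | zero => exact absurd h2 (by push_cast; omega)
  | succ m ih =>
    rw [bform_cons_succ, bform_cons_succ]
    by_cases hx : x.2 = ((m + 1 : Nat) : Int)
    · -- x belongs to the topmost bucket: it goes right after it
      rw [insertBy_append_of_forall_not _ _ _ _ (by
        intro b hb
        simp only [List.mem_filter, beq_iff_eq] at hb
        simp [hb.2, hx])]
      have hrest : PySem.List.insertBy (fun a b => decide (b.2 < a.2)) x (bform m xs)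
          = x :: bform m xs := by
        cases hb : bform m xs with
        | nil => simp [PySem.List.insertBy]
        | cons b rest =>
          have hbmem : b ∈ bform m xs := by rw [hb]; simp
          have := (mem_bform hbmem).2.2
          have hlt : b.2 < x.2 := by rw [hx]; push_cast; push_cast at this; omega
          simp [PySem.List.insertBy, hlt]
      rw [hrest, List.filter_append, bform_append_high (by rw [hx]; push_cast; omega)]
      simp [hx]
    · have hxm : x.2 ≤ (m : Int) := by push_cast at h2 hx ⊢; omega
      rw [insertBy_append_of_forall_not _ _ _ _ (by
        intro b hb
        simp only [List.mem_filter, beq_iff_eq] at hb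
        have : ¬ (b.2 < x.2) := by rw [hb.2]; push_cast; omega
        simp [this])]
      rw [ih hxm xs, List.filter_append]
      have hx' : ¬ x.2 = (m : Int) + 1 := by push_cast at hx; omega
      simp [hx']

lemma sorted_eq_bform (m : Nat) (xs : List (String × Int))
    (h : ∀ x ∈ xs, 1 ≤ x.2 ∧ x.2 ≤ (m : Int)) :
    PySem.List.sorted xs (fun x => x.2) true = bform m xs := by
  rw [PySem.List.sorted_rev_eq_foldl_insertBy]
  induction xs using List.reverseRecOn with
  | nil => simp [bform_nil]
  | append_singleton ys x ih =>
    rw [List.foldl_append, List.foldl_cons, List.foldl_nil,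
      ih (fun y hy => h y (by simp [hy]))]
    exact insert_bform (h x (by simp)).1 (h x (by simp)).2 ys

lemma insert_items_sub {d : PySem.Dict String Int} {k : String} {v : Int} {p : String × Int}
    (h : p ∈ (PySem.Dict.insert d k v).items) : p = (k, v) ∨ p ∈ d.items := by
  simp only [PySem.Dict.insert] at h
  split at h
  · simp only [List.mem_map] at h
    obtain ⟨q, hq, hqe⟩ := h
    by_cases hk : (q.1 == k) = true
    · simp [hk] at hqe; exact Or.inl hqe.symm
    · simp [hk] at hqe; exact Or.inr (hqe ▸ hq)
  · simp only [List.mem_append, List.mem_singleton] at h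
    exact h.symm

lemma getD_nonneg {d : PySem.Dict String Int} (hd : ∀ p ∈ d.items, 1 ≤ p.2) (k : String) :
    0 ≤ PySem.Dict.getD d k 0 := by
  simp only [PySem.Dict.getD, PySem.Dict.get?]
  cases hf : List.find? (fun p => p.1 == k) d.items with
  | none => simp
  | some q =>
    have := hd q (List.mem_of_find?_eq_some hf)
    simp only [Option.map_some, Option.getD_some]
    omega

lemma build_pos_aux (links : List String) :
    ∀ (d : PySem.Dict String Int), (∀ p ∈ d.items, 1 ≤ p.2) →
    ∀ p ∈ (links.foldl (fun d link =>
      if (PySem.Dict.get? d link).isSome then PySem.Dict.modify d link 0 (· + 1)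
      else PySem.Dict.insert d link 1) d).items, 1 ≤ p.2 := by
  induction links with
  | nil => intro d hd; exact hd
  | cons link rest ih =>
    intro d hd
    rw [List.foldl_cons]
    apply ih
    intro p hp
    split at hp
    · rcases insert_items_sub hp with rfl | hold
      · have := getD_nonneg hd link; simp only; omega
      · exact hd _ hold
    · rcases insert_items_sub hp with rfl | hold
      · norm_num
      · exact hd _ hold

lemma build_pos (links : List String) : ∀ p ∈ (pvBuild links).items, 1 ≤ p.2 := by
  exact build_pos_aux links ⟨[]⟩ (by simp)

lemma max?_cons_isSome {α κ : Type} [LT κ] [DecidableLT κ] (x : α) (xs : List α) (key : α → κ) :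
    (PySem.List.max? (x :: xs) key).isSome := by
  suffices h : ∀ (l : List α) (a : α),
      (List.foldl (fun acc y => match acc with
        | none => some y
        | some m => if key m < key y then some y else some m) (some a) l).isSome by
    simpa [PySem.List.max?] using h xs x
  intro l
  induction l with
  | nil => intro a; simp
  | cons y ys ih => intro a; simp only [List.foldl_cons]; split <;> exact ih _

lemma set_map_range {β : Type} (f : Nat → β) (n k : Nat) (v : β) :
    ((List.range n).map f).set k v
      = (List.range n).map (fun c => if c = k then v else f c) := by
  apply List.ext_getElem
  · simp
  · intro i h1 h2
    simp only [List.getElem_set, List.getElem_map, List.getElem_range]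
    by_cases hik : i = k
    · simp [hik]
    · simp [hik, Ne.symm hik]

lemma fill_buckets (m : Nat) (ys : List (String × Int)) (f : Nat → List (String × Int))
    (h : ∀ y ∈ ys, 1 ≤ y.2 ∧ y.2 ≤ (m : Int)) :
    ys.foldl (fun bs item => PySem.List.pySetD bs item.2 (PySem.List.pyGetD bs item.2 [] ++ [item]))
        ((List.range (m + 1)).map f)
      = (List.range (m + 1)).map (fun c => f c ++ ys.filter (fun y => y.2 == (c : Int))) := by
  induction ys generalizing f with
  | nil => simp
  | cons it ys ih =>
    obtain ⟨h1, h2⟩ := h it (by simp)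
    obtain ⟨k, hit⟩ : ∃ k : Nat, it.2 = (k : Int) := ⟨it.2.toNat, by omega⟩
    have hkm : k < m + 1 := by omega
    rw [List.foldl_cons, hit, PySem.List.pyGetD_natCast, PySem.List.getD_map_range _ _ _ _ hkm,
      PySem.List.pySetD_natCast, set_map_range,
      ih (fun c => if c = k then f k ++ [it] else f c) (fun y hy => h y (by simp [hy]))]
    apply List.map_congr_left
    intro c hc
    rw [List.filter_cons]
    by_cases hck : c = k
    · subst hck
      have : (it.2 == (c : Int)) = true := by simp [hit]
      simp [this]
    · have : (it.2 == (c : Int)) = false := by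
        simp only [hit, beq_eq_false_iff_ne, ne_eq, Nat.cast_inj]
        exact fun he => hck he.symm
      simp [this, hck]

lemma descInts_eq_map (m : Nat) :
    descInts m = (List.range m).map (fun k : Nat => (m : Int) + (-1) * (k : Int)) := by
  induction m with
  | zero => simp [descInts]
  | succ m ih =>
    simp only [descInts, List.range_succ_eq_map, List.map_cons, List.map_map, ih]
    refine List.cons_eq_cons.mpr ⟨by push_cast; ring, ?_⟩
    apply List.map_congr_left
    intro k _
    simp only [Function.comp_apply, Nat.succ_eq_add_one]
    push_cast; ring

lemma pyRange_desc (m : Nat) : PySem.List.pyRange (m : Int) 0 (-1) = descInts m := by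
  rw [descInts_eq_map]
  simp only [PySem.List.pyRange]
  norm_num
  rcases Nat.eq_zero_or_pos m with hm | hm
  · subst hm; simp
  · simp [hm]

-- ===== VERDICT (by name: the statement is the Claim_ definition above) =====
lemma maxv_bounds (links : List String) :
    0 ≤ PySem.List.maxD (PySem.Dict.values (pvBuild links)) (fun v => v) 0 ∧
    ∀ p ∈ (pvBuild links).items,
      p.2 ≤ PySem.List.maxD (PySem.Dict.values (pvBuild links)) (fun v => v) 0 := by
  have hpos := build_pos links
  cases hv : PySem.Dict.values (pvBuild links) with
  | nil =>
    have hitems : (pvBuild links).items = [] := by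
      have := congrArg List.length hv
      simpa [PySem.Dict.values] using this
    simp [PySem.List.maxD, PySem.List.max?, hitems]
  | cons v vs =>
    obtain ⟨m0, hm0⟩ := Option.isSome_iff_exists.mp (max?_cons_isSome v vs (fun v => v))
    have hmaxD : PySem.List.maxD (v :: vs) (fun v => v) 0 = m0 := by
      simp [PySem.List.maxD, hm0]
    have hmax := PySem.List.max?_isMax hm0
    have hv1 : 1 ≤ v := by
      have : v ∈ PySem.Dict.values (pvBuild links) := by rw [hv]; simp
      simp only [PySem.Dict.values, List.mem_map] at this
      obtain ⟨p, hp, rfl⟩ := this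
      exact hpos p hp
    constructor
    · rw [hmaxD]
      have := hmax v (by simp)
      omega
    · intro p hp
      rw [hmaxD]
      apply hmax
      rw [← hv]
      simp only [PySem.Dict.values, List.mem_map]
      exact ⟨p, hp, rfl⟩

theorem count_duplicate_links_spec : Claim_equal_count_duplicate_links := by
  intro links _
  show count_duplicate_links links = count_duplicate_links_alt links
  have hpos := build_pos links
  obtain ⟨h0, hub⟩ := maxv_bounds links
  obtain ⟨m, hm⟩ : ∃ m : Nat,
      PySem.List.maxD (PySem.Dict.values (pvBuild links)) (fun v => v) 0 = (m : Int) :=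
    ⟨_, (Int.toNat_of_nonneg h0).symm⟩
  have hA : count_duplicate_links links
      = PySem.List.sorted (PySem.Dict.items (pvBuild links)) (fun x => x.2) true := rfl
  have hB : count_duplicate_links_alt links
      = (PySem.List.pyRange
            (PySem.List.maxD (PySem.Dict.values (pvBuild links)) (fun v => v) 0) 0 (-1)).foldl
          (fun result c => result ++ PySem.List.pyGetD
            ((PySem.Dict.items (pvBuild links)).foldl
              (fun bs item => PySem.List.pySetD bs item.2 (PySem.List.pyGetD bs item.2 [] ++ [item]))
              (List.replicate
                ((PySem.List.maxD (PySem.Dict.values (pvBuild links)) (fun v => v) 0) + 1).toNat []))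
            c []) [] := rfl
  have hbounds : ∀ p ∈ (pvBuild links).items, 1 ≤ p.2 ∧ p.2 ≤ (m : Int) :=
    fun p hp => ⟨hpos p hp, hm ▸ hub p hp⟩
  have hrep : List.replicate (m + 1) ([] : List (String × Int))
      = (List.range (m + 1)).map (fun _ => []) := by simp
  have htn : ((m : Int) + 1).toNat = m + 1 := by omega
  rw [hA, hB, hm, htn, hrep, fill_buckets m _ _ hbounds,
    PySem.List.foldl_append_eq_flatMap, pyRange_desc,
    sorted_eq_bform m _ hbounds]
  rw [List.nil_append]
  unfold bform
  apply List.flatMap_congr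
  intro c hc
  obtain ⟨k, rfl, h1, h2⟩ := mem_descInts hc
  rw [PySem.List.pyGetD_natCast, PySem.List.getD_map_range _ _ _ _ (by omega)]
  simp
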